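-- pv_equiv track=rewrite | github.com/Xero-Hige/Magus | src/libs/text_reducer.py | reduce_text
-- ===== SOURCE A (Python) =====
-- MAX_REPS = 3
--
-- def reduce_text(text):
--     accumulator = []
--
--     last_char = None
--     last_count = 0
--     for actual_char in text:
--         if last_char != actual_char:
--             last_count = 0
--             last_char = actual_char
--
--         last_count += 1
--
--         if last_count > MAX_REPS:
--             continue
--
--         accumulator.append(actual_char)
--
--     return "".join(accumulator)
-- ===== SOURCE B (Python) =====
-- from itertools import groupby
--
-- MAX_REPS = 3
--
-- def reduce_text(text):
--     parts = []
--     for ch, grp in groupby(text):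
--         n = sum(1 for _ in grp)
--         parts.append(ch * min(n, MAX_REPS))
--     return "".join(parts)
-- ===== Notes on version B (the rewrite author's own statement) =====
-- stated objective: idiomatic
-- what changed: Replaced the manual last_char/last_count state machine with itertools.groupby over maximal runs, emitting min(run length, MAX_REPS) copies of each run's character.
import Mathlib
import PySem

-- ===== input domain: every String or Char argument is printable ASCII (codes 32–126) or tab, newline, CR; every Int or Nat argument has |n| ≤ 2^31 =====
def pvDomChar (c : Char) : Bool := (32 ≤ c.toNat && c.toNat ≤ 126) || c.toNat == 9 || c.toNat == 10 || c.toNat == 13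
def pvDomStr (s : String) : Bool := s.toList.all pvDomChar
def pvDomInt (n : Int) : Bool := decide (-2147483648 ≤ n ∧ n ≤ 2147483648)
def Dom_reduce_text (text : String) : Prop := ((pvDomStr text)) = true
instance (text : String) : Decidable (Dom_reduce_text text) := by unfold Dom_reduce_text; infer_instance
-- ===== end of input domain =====

-- B replaces A's manual last_char/last_count state machine by itertools.groupby over maximal
-- runs, emitting min(run length, MAX_REPS) copies of each run's character (objective: idiomatic).

-- ===== PORT A =====
-- the for-loop's state: (accumulator, last_char, last_count); one step per character, as in A
def reduceTextStep (st : List Char × Option Char × Int) (actual_char : Char) :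
    List Char × Option Char × Int :=
  let (accumulator, last_char, last_count) := st
  -- if last_char != actual_char: last_count = 0; last_char = actual_char
  let (last_char, last_count) :=
    if last_char ≠ some actual_char then (some actual_char, (0 : Int)) else (last_char, last_count)
  let last_count := last_count + 1
  if last_count > 3 then (accumulator, last_char, last_count)   -- continue
  else (accumulator ++ [actual_char], last_char, last_count)    -- accumulator.append(actual_char)

def reduce_text (text : String) : String :=
  String.ofList (text.toList.foldl reduceTextStep ([], none, 0)).1  -- "".join(accumulator)

-- ===== PORT B =====
-- port of itertools.groupby(text): the list of maximal runs of equal characters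
def pyGroupby : List Char → List (List Char)
  | [] => []
  | c :: cs => (c :: cs.takeWhile (· == c)) :: pyGroupby (cs.dropWhile (· == c))
termination_by l => l.length
decreasing_by simpa using Nat.lt_succ_of_le (List.length_dropWhile_le (· == c) cs)

def reduce_text_alt (text : String) : String :=
  -- for ch, grp in groupby(text): parts.append(ch * min(len(list(grp)), 3)); "".join(parts)
  String.ofList (((pyGroupby text.toList).map (fun g =>
    match g with
    | [] => []
    | ch :: _ => List.replicate (min g.length 3) ch)).flatten)

-- ===== PRECONDITION & SPEC =====
def Spec_reduce_text (text : String) (out : String) : Prop := out = reduce_text_alt text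
instance (text : String) (out : String) : Decidable (Spec_reduce_text text out) := by unfold Spec_reduce_text; infer_instance

-- ===== CLAIM (what is proved, stated in full; the proofs are below) =====
def Claim_equal_reduce_text : Prop := ∀ (text : String), Dom_reduce_text text → Spec_reduce_text text (reduce_text text)

-- ===== LEMMAS AND PROOFS =====

-- A's loop, rephrased as emitted output of the remaining input given the carried state
def loopA : Option Char → Int → List Char → List Char
  | _, _, [] => []
  | last, cnt, c :: cs =>
    let cnt1 : Int := if last = some c then cnt + 1 else 1
    (if cnt1 > 3 then [] else [c]) ++ loopA (some c) cnt1 cs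

theorem foldl_reduceTextStep (l : List Char) :
    ∀ (acc : List Char) (last : Option Char) (cnt : Int),
    (l.foldl reduceTextStep (acc, last, cnt)).1 = acc ++ loopA last cnt l := by
  induction l with
  | nil => intro acc last cnt; simp [loopA]
  | cons c cs ih =>
    intro acc last cnt
    by_cases h : last = some c
    · by_cases h3 : cnt + 1 > 3 <;>
        simp [reduceTextStep, loopA, h, h3, ih]
    · simp [reduceTextStep, loopA, h, ih]

-- resetting: whenever the next char differs from the carried last_char, the state is irrelevant
theorem loopA_reset (last : Option Char) (cnt : Int) (l : List Char)
    (h : ∀ c cs, l = c :: cs → last ≠ some c) :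
    loopA last cnt l = loopA none 0 l := by
  cases l with
  | nil => rfl
  | cons c cs => simp [loopA, h c cs rfl]

-- one run: all of `same` equals c; emission while count stays ≤ 3
theorem loopA_run (c : Char) (rest : List Char) :
    ∀ (same : List Char), (∀ x ∈ same, x = c) → ∀ (k : Int), 1 ≤ k →
    loopA (some c) k (same ++ rest) =
      List.replicate (min same.length (3 - k).toNat) c ++ loopA (some c) (k + same.length) rest := by
  intro same
  induction same with
  | nil => intro _ k _; simp
  | cons x xs ih =>
    intro hall k hk
    have hx : x = c := hall x (by simp)
    subst hx
    have hxs : ∀ y ∈ xs, y = x := fun y hy => hall y (by simp [hy])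
    rw [List.cons_append]
    simp only [loopA, if_true]
    rw [ih hxs (k + 1) (by omega)]
    rw [show k + 1 + (xs.length : Int) = k + ((x :: xs).length : Int) by simp only [List.length_cons]; push_cast; omega]
    by_cases h3 : k + 1 > 3
    · have h1 : (3 - k).toNat = 0 := by omega
      have h2 : (3 - (k + 1)).toNat = 0 := by omega
      simp only [if_pos h3, List.nil_append, h1, h2, Nat.min_zero, List.replicate_zero]
    · have h2 : (3 - k).toNat = (3 - (k + 1)).toNat + 1 := by omega
      have hmin : min (xs.length + 1) ((3 - (k + 1)).toNat + 1)
          = min xs.length (3 - (k + 1)).toNat + 1 := by omega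
      simp only [if_neg h3, List.length_cons, h2, hmin, List.replicate_succ,
        List.cons_append, List.nil_append]

theorem loopA_eq_flatten : ∀ (l : List Char),
    loopA none 0 l = ((pyGroupby l).map (fun g =>
      match g with
      | [] => []
      | ch :: _ => List.replicate (min g.length 3) ch)).flatten := by
  intro l
  induction l using pyGroupby.induct with
  | case1 => rw [pyGroupby]; simp [loopA]
  | case2 c cs ih =>
    rw [pyGroupby]
    simp only [List.map_cons, List.flatten_cons]
    rw [← ih]
    have hsplit : cs = cs.takeWhile (· == c) ++ cs.dropWhile (· == c) :=
      (List.takeWhile_append_dropWhile).symm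
    simp only [loopA, reduceCtorEq, if_false]
    conv_lhs => rw [hsplit]
    rw [loopA_run c _ _ (fun x hx => by simpa using List.mem_takeWhile_imp (p := (· == c)) hx) 1 le_rfl]
    rw [loopA_reset _ _ _ (fun d ds hd => by
      intro hcd
      have h := List.head?_dropWhile_not (· == c) cs
      rw [hd] at h
      rw [show d = c from (Option.some_inj.mp hcd).symm] at h
      simp at h)]
    have h2 : ((3 : Int) - 1).toNat = 2 := rfl
    have hmin : min ((cs.takeWhile (· == c)).length + 1) 3
        = min (cs.takeWhile (· == c)).length 2 + 1 := by omega
    simp only [if_neg (by norm_num : ¬ (1:Int) > 3), List.length_cons,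
      h2, hmin, List.replicate_succ, List.cons_append, List.nil_append]

-- ===== VERDICT (by name: the statement is the Claim_ definition above) =====
theorem reduce_text_spec : Claim_equal_reduce_text := by
  intro text _
  unfold Spec_reduce_text reduce_text reduce_text_alt
  rw [foldl_reduceTextStep, List.nil_append, loopA_eq_flatten]
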